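-- pv_equiv track=rewrite | github.com/Stark-Code/Code_Wars | nonoClass.py | limitSolutions
-- ===== SOURCE A (Python) =====
-- def limitSolutions(rowSolutions, colSolutions):
--     for col in colSolutions:
--         if len(colSolutions[col]) == 1:
--             for idx in range(len(colSolutions[col][0])):
--                 removals = []
--                 for solIdx, sol in enumerate(rowSolutions[idx]):
--                     if sol[col] != colSolutions[col][0][idx]:
--                         removals.append(rowSolutions[idx][solIdx])
--                 for remove in removals:
--                     rowSolutions[idx].pop(rowSolutions[idx].index(remove))
--
--     return rowSolutions
-- ===== SOURCE B (Python) =====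
-- def limitSolutions(rowSolutions, colSolutions):
--     singles = [(col, sols[0]) for col, sols in colSolutions.items() if len(sols) == 1]
--     for idx in range(len(rowSolutions)):
--         rowSolutions[idx][:] = [
--             sol for sol in rowSolutions[idx]
--             if all(sol[col] == v0[idx] for col, v0 in singles if idx < len(v0))
--         ]
--     return rowSolutions
-- ===== Notes on version B (the rewrite author's own statement) =====
-- stated objective: simpler
-- what changed: Instead of per-column removal lists drained with pop(index(...)), B precomputes the list of fixed (singleton) column constraints once and then rewrites each row in a single in-place filter pass against all its constraints (short-circuiting in the same constraint order).
import Mathlib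
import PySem

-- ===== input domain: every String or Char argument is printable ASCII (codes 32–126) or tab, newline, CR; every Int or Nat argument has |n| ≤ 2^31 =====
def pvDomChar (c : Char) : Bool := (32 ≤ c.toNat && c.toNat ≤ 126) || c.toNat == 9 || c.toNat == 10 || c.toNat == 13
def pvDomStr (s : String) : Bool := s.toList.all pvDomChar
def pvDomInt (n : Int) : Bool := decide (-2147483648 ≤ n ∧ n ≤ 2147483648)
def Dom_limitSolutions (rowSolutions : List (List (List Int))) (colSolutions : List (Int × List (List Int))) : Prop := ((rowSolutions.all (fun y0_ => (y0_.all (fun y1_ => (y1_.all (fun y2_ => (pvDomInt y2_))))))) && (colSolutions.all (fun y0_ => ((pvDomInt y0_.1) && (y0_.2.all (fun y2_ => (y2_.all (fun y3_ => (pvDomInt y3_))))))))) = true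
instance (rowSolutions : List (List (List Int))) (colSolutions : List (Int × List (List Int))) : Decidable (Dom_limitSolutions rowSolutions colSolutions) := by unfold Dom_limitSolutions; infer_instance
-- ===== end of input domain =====

-- B replaces A's per-column removal lists drained with pop(index(...)) by a precomputed list of
-- fixed-column constraints and one in-place filter pass per row (simpler; return value proved equal;
-- both Pythons mutate rowSolutions' inner lists in place the same way).


-- ===== PORT A =====
-- sol[col] != target  (none = IndexError, excluded by Pre_)
def aSolFails (col target : Int) (sol : List Int) : Bool :=
  match PySem.List.pyGet? sol col with
  | none => true
  | some x => x != target

-- rowSolutions[idx].pop(rowSolutions[idx].index(remove)); the none branches are unreachable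
-- because every removal is a member of the row at pop time
def aRemoveOne (row : List (List Int)) (rem : List Int) : List (List Int) :=
  match PySem.List.index? row rem with
  | none => row
  | some i =>
    match PySem.List.pop? row (i : Int) with
    | none => row
    | some pr => pr.2

-- the body of A's 'for idx in range(...)' loop: collect removals, then pop them one by one
-- (rowSolutions[idx] would raise IndexError on none, excluded by Pre_)
def aProcessIdx (col target : Int) (rows : List (List (List Int))) (idx : Nat) : List (List (List Int)) :=
  match PySem.List.pyGet? rows (idx : Int) with
  | none => rows
  | some row =>
    let removals := row.filter (fun sol => aSolFails col target sol)
    rows.set idx (removals.foldl aRemoveOne row)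

-- A's work for one dict entry (col, sols)
def aColStep (rows : List (List (List Int))) (p : Int × List (List Int)) : List (List (List Int)) :=
  if p.2.length == 1 then
    match p.2.head? with
    | none => rows   -- unreachable: p.2 has length 1
    | some v0 =>
      (List.range v0.length).foldl (fun rows idx => aProcessIdx p.1 (v0.getD idx 0) rows idx) rows
  else rows

def limitSolutions (rowSolutions : List (List (List Int))) (colSolutions : List (Int × List (List Int))) : List (List (List Int)) :=
  let d := PySem.Dict.ofList colSolutions
  d.keys.foldl (fun rows col =>
    match d.get? col with
    | none => rows   -- unreachable: col is a key of d
    | some sols => aColStep rows (col, sols)) rowSolutions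

-- ===== PORT B =====
-- one conjunct of Source B's all(...): sol[col] == v0[idx] for the constraints with idx < len(v0)
def bKeep1 (idx : Nat) (sol : List Int) (cv : Int × List Int) : Bool :=
  if idx < cv.2.length then
    match PySem.List.pyGet? sol cv.1 with
    | none => false   -- sol[col] would raise IndexError; excluded by Pre_ (short-circuit: reached only after all earlier constraints matched)
    | some x => x == cv.2.getD idx 0
  else true

-- singles = [(col, sols[0]) for col, sols in colSolutions.items() if len(sols) == 1]
def bSingles (colSolutions : List (Int × List (List Int))) : List (Int × List Int) :=
  ((PySem.Dict.ofList colSolutions).items.filter (fun p => p.2.length == 1)).map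
    (fun p => (p.1, p.2.headD []))

def limitSolutions_alt (rowSolutions : List (List (List Int))) (colSolutions : List (Int × List (List Int))) : List (List (List Int)) :=
  let singles := bSingles colSolutions
  (List.range rowSolutions.length).foldl
    (fun rows idx =>
      rows.set idx ((rows.getD idx []).filter (fun sol => singles.all (bKeep1 idx sol))))
    rowSolutions

-- ===== PRECONDITION & SPEC =====
-- The fixed-column constraints applicable to row idx, in dict order (for Pre_ only)
def preConstraints (colSolutions : List (Int × List (List Int))) (idx : Nat) : List (Int × Int) :=
  (((PySem.Dict.ofList colSolutions).items.filter (fun p => p.2.length == 1)).filter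
      (fun p => idx < (p.2.headD []).length)).map
    (fun p => (p.1, (p.2.headD []).getD idx 0))

-- A never raises on this solution: scanning its constraints in order, an in-range mismatch
-- (which removes it) occurs before any out-of-range column access
def solSafe : List (Int × Int) → List Int → Bool
  | [], _ => true
  | (col, t) :: cs, sol =>
    match PySem.List.pyGet? sol col with
    | none => false
    | some x => if x ≠ t then true else solSafe cs sol

-- Pre_ excludes exactly the inputs on which A raises IndexError: a fixed column longer than
-- rowSolutions (rowSolutions[idx] out of range), or some row solution whose first failing
-- constraint in column order is an out-of-range sol[col] access.
def Pre_limitSolutions (rowSolutions : List (List (List Int))) (colSolutions : List (Int × List (List Int))) : Prop :=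
  (∀ p ∈ (PySem.Dict.ofList colSolutions).items, p.2.length = 1 →
      (p.2.headD []).length ≤ rowSolutions.length) ∧
  ∀ idx < rowSolutions.length, ∀ sol ∈ rowSolutions.getD idx [],
    solSafe (preConstraints colSolutions idx) sol = true
instance (rowSolutions : List (List (List Int))) (colSolutions : List (Int × List (List Int))) : Decidable (Pre_limitSolutions rowSolutions colSolutions) := by unfold Pre_limitSolutions; infer_instance

def pvWitness_limitSolutions : List (List (List Int)) × (List (Int × List (List Int))) :=
  ([[[1], [0]]], [(0, [[1]])])

def Spec_limitSolutions (rowSolutions : List (List (List Int))) (colSolutions : List (Int × List (List Int))) (out : List (List (List Int))) : Prop := out = limitSolutions_alt rowSolutions colSolutions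
instance (rowSolutions : List (List (List Int))) (colSolutions : List (Int × List (List Int))) (out : List (List (List Int))) : Decidable (Spec_limitSolutions rowSolutions colSolutions out) := by unfold Spec_limitSolutions; infer_instance

-- ===== CLAIM (what is proved, stated in full; the proofs are below) =====
def Claim_equal_limitSolutions : Prop := ∀ (rowSolutions : List (List (List Int))) (colSolutions : List (Int × List (List Int))), Dom_limitSolutions rowSolutions colSolutions → Pre_limitSolutions rowSolutions colSolutions → Spec_limitSolutions rowSolutions colSolutions (limitSolutions rowSolutions colSolutions)

-- ===== LEMMAS AND PROOFS =====

-- the common pointwise shape of both loops: replace row idx by its filtered version, if it exists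
def setFilter (g : Nat → List Int → Bool) (rows : List (List (List Int))) (idx : Nat) : List (List (List Int)) :=
  match rows[idx]? with
  | none => rows
  | some row => rows.set idx (row.filter (g idx))

lemma setFilter_none {g : Nat → List Int → Bool} {rows : List (List (List Int))} {idx : Nat}
    (h : rows[idx]? = none) : setFilter g rows idx = rows := by
  unfold setFilter; rw [h]

lemma setFilter_some {g : Nat → List Int → Bool} {rows : List (List (List Int))} {idx : Nat}
    {row : List (List Int)} (h : rows[idx]? = some row) :
    setFilter g rows idx = rows.set idx (row.filter (g idx)) := by
  unfold setFilter; rw [h]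

-- draining the removal list with pop(index(...)) never touches a surviving element …
lemma popAll_cons_of_ne (p : List Int → Bool) (x : List Int) (rems : List (List Int))
    (hrem : ∀ r ∈ rems, p r = true) (hx : p x = false) :
    ∀ row : List (List Int), rems.foldl aRemoveOne (x :: row) = x :: rems.foldl aRemoveOne row := by
  induction rems with
  | nil => intro row; rfl
  | cons r rems ih =>
    intro row
    have hr : p r = true := hrem r (by simp)
    have hne : x ≠ r := fun h => by rw [h, hr] at hx; cases hx
    have h1 : aRemoveOne (x :: row) r = x :: aRemoveOne row r := by
      unfold aRemoveOne
      rw [PySem.List.index?_cons_of_ne row hne]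
      cases hidx : PySem.List.index? row r with
      | none => simp
      | some i =>
        obtain ⟨hk, -, -⟩ := PySem.List.getElem_of_index?_eq_some hidx
        have h2 : ((i : Nat) + 1 : Nat) < (x :: row).length := by simp; omega
        simp only [Option.map_some]
        rw [PySem.List.pop?_natCast _ _ h2, PySem.List.pop?_natCast _ _ hk]
        simp [List.eraseIdx_cons_succ]
    rw [List.foldl_cons, List.foldl_cons, h1, ih (fun r' hr' => hrem r' (by simp [hr']))]

-- … so it is exactly filtering by the complement predicate
lemma popAll_filter (p : List Int → Bool) (row : List (List Int)) :
    (row.filter p).foldl aRemoveOne row = row.filter (fun s => !p s) := by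
  induction row with
  | nil => rfl
  | cons x row ih =>
    by_cases hp : p x = true
    · rw [List.filter_cons_of_pos hp, List.foldl_cons]
      have h1 : aRemoveOne (x :: row) x = row := by
        unfold aRemoveOne
        rw [PySem.List.index?_cons_self]
        simp [PySem.List.pop?_zero_cons]
      rw [h1, ih, List.filter_cons_of_neg (by simp [hp])]
    · have hp' : p x = false := by revert hp; cases p x <;> simp
      rw [List.filter_cons_of_neg (by simp [hp']), List.filter_cons_of_pos (by simp [hp'])]
      rw [popAll_cons_of_ne p x _ (fun r hr => List.of_mem_filter hr) hp' row, ih]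

lemma aProcessIdx_eq_setFilter (col target : Int) (rows : List (List (List Int))) (idx : Nat) :
    aProcessIdx col target rows idx = setFilter (fun _ s => !aSolFails col target s) rows idx := by
  unfold aProcessIdx setFilter
  rw [PySem.List.pyGet?_natCast]
  cases h : rows[idx]? with
  | none => rfl
  | some row => simp only []; rw [popAll_filter]

lemma b_body_eq_setFilter (g : Nat → List Int → Bool) (rows : List (List (List Int))) (idx : Nat) :
    rows.set idx ((rows.getD idx []).filter (g idx)) = setFilter g rows idx := by
  unfold setFilter
  cases h : rows[idx]? with
  | none =>
    have hlen : rows.length ≤ idx := by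
      by_contra hlt
      exact absurd h (by simp [List.getElem?_eq_getElem (by omega : idx < rows.length)])
    rw [List.set_eq_of_length_le hlen]
  | some row =>
    rw [List.getD_eq_getElem?_getD, h]
    rfl

-- pointwise effect of a range-fold of setFilter steps
lemma fold_setFilter_get? (g : Nat → List Int → Bool) :
    ∀ (n : Nat) (rows : List (List (List Int))) (i : Nat),
      ((List.range n).foldl (setFilter g) rows)[i]? =
        if i < n then (rows[i]?).map (fun row => row.filter (g i)) else rows[i]? := by
  intro n
  induction n with
  | zero => intro rows i; simp
  | succ n ih =>
    intro rows i
    rw [List.range_succ, List.foldl_append, List.foldl_cons, List.foldl_nil]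
    cases hR : ((List.range n).foldl (setFilter g) rows)[n]? with
    | none =>
      have hrows : rows[n]? = none := by have := ih rows n; simp at this; rw [← this]; exact hR
      rw [setFilter_none hR, ih rows i]
      by_cases hi : i = n
      · subst hi; simp [hrows]
      · by_cases hin : i < n <;> simp [hin, show i < n + 1 ↔ i < n ∨ i = n by omega, hi]
    | some row =>
      have hrows : rows[n]? = some row := by have := ih rows n; simp at this; rw [← this]; exact hR
      have hnlen : n < ((List.range n).foldl (setFilter g) rows).length := by
        obtain ⟨h, -⟩ := List.getElem?_eq_some_iff.mp hR; exact h
      rw [setFilter_some hR, List.getElem?_set]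
      by_cases hi : i = n
      · subst hi; simp [hnlen, hrows]
      · rw [if_neg (fun h => hi h.symm), ih rows i]
        by_cases hin : i < n <;> simp [hin, show i < n + 1 ↔ i < n ∨ i = n by omega, hi]

-- the single-column keep predicate of A agrees with B's conjunct
lemma aSolFails_bKeep1 (col : Int) (v0 : List Int) (i : Nat) (hi : i < v0.length) (sol : List Int) :
    (!aSolFails col (v0.getD i 0) sol) = bKeep1 i sol (col, v0) := by
  unfold aSolFails bKeep1
  simp only [hi, if_pos]
  cases PySem.List.pyGet? sol col <;> simp [bne]

-- sequential processing of the dict items equals one filter by all collected constraints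
lemma items_fold_get? :
    ∀ (items : List (Int × List (List Int))) (rows : List (List (List Int))) (i : Nat),
      (items.foldl aColStep rows)[i]? =
        (rows[i]?).map (fun row => row.filter (fun sol =>
          ((items.filter (fun p => p.2.length == 1)).map (fun p => (p.1, p.2.headD []))).all
            (bKeep1 i sol))) := by
  intro items
  induction items with
  | nil => intro rows i; cases h : rows[i]? <;> simp [h]
  | cons p items ih =>
    intro rows i
    rw [List.foldl_cons, ih]
    by_cases hlen : p.2.length = 1
    · obtain ⟨v0, hv0⟩ : ∃ v0, p.2 = [v0] := by
        cases h2 : p.2 with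
        | nil => rw [h2] at hlen; cases hlen
        | cons a t => rw [h2] at hlen; simp at hlen; exact ⟨a, by rw [hlen]⟩
      have hstep : aColStep rows p =
          (List.range v0.length).foldl (setFilter (fun j s => !aSolFails p.1 (v0.getD j 0) s)) rows := by
        unfold aColStep
        rw [hv0]
        simp only [List.length_cons, List.length_nil, List.head?_cons, beq_self_eq_true, if_pos]
        exact PySem.List.foldl_congr_mem _ _ _ _ (by
          intro rs j _
          exact aProcessIdx_eq_setFilter p.1 (v0.getD j 0) rs j)
      rw [hstep, fold_setFilter_get? _ v0.length rows i]
      rw [List.filter_cons_of_pos (by simp [hlen]), List.map_cons]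
      simp only [hv0, List.headD_cons]
      by_cases hi : i < v0.length
      · rw [if_pos hi]
        cases hr : rows[i]? with
        | none => simp
        | some row =>
          simp only [Option.map_some, List.filter_filter, Option.some.injEq]
          apply List.filter_congr
          intro sol _
          rw [aSolFails_bKeep1 p.1 v0 i hi sol, List.all_cons]
          exact Bool.and_comm _ _
      · rw [if_neg hi]
        cases rows[i]? with
        | none => rfl
        | some row =>
          simp only [Option.map_some, Option.some.injEq]
          apply List.filter_congr
          intro sol _
          rw [List.all_cons]
          unfold bKeep1
          simp [hi]
    · unfold aColStep
      rw [if_neg (by simpa using hlen), List.filter_cons_of_neg (by simpa using hlen)]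

-- A's keys-loop with lookup is the items-loop
lemma keys_fold_eq_items_fold (d : PySem.Dict Int (List (List Int))) (hnd : d.keys.Nodup)
    (init : List (List (List Int))) :
    d.keys.foldl (fun rows col =>
      match d.get? col with
      | none => rows
      | some sols => aColStep rows (col, sols)) init = d.items.foldl aColStep init := by
  have hkeys : d.keys = d.items.map Prod.fst := rfl
  rw [hkeys, List.foldl_map]
  exact PySem.List.foldl_congr_mem _ _ _ _ (by
    intro rows p hp
    have : d.get? p.1 = some p.2 := PySem.Dict.get?_of_mem_items d (by exact hp) hnd
    rw [this])

-- ===== VERDICT (by name: the statement is the Claim_ definition above) =====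
theorem limitSolutions_spec : Claim_equal_limitSolutions := by
  intro rows cols _ _
  unfold Spec_limitSolutions limitSolutions limitSolutions_alt
  apply List.ext_getElem?
  intro i
  rw [keys_fold_eq_items_fold _ (PySem.Dict.nodup_keys_ofList cols) rows,
      items_fold_get? _ rows i]
  have hb : ((List.range rows.length).foldl
      (setFilter (fun j sol => (bSingles cols).all (bKeep1 j sol))) rows)[i]? =
      if i < rows.length then (rows[i]?).map
        (fun row => row.filter (fun sol => (bSingles cols).all (bKeep1 i sol)))
      else rows[i]? :=
    fold_setFilter_get? _ rows.length rows i
  rw [show (List.range rows.length).foldl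
        (fun rs idx => rs.set idx ((rs.getD idx []).filter (fun sol => (bSingles cols).all (bKeep1 idx sol)))) rows
      = (List.range rows.length).foldl
        (setFilter (fun j sol => (bSingles cols).all (bKeep1 j sol))) rows from
      PySem.List.foldl_congr_mem _ _ _ _ (fun rs j _ => b_body_eq_setFilter (fun k sol => (bSingles cols).all (bKeep1 k sol)) rs j), hb]
  by_cases hi : i < rows.length
  · rw [if_pos hi]; rfl
  · rw [if_neg hi, List.getElem?_eq_none (by omega)]; rfl
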